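-- pv_equiv track=rewrite | github.com/JStepUX/CardShark | lore_manager.py | find_duplicate_keys
-- ===== SOURCE A (Python) =====
-- def find_duplicate_keys(entries):
--     """Find entries that contain duplicate keywords."""
--     keyword_count = {}
--     duplicate_entries = set()
--
--     # Count all keywords across entries
--     for entry in entries:
--         keywords = [k.strip().lower() for k in entry.get('keys', [])]
--         for keyword in keywords:
--             if keyword:
--                 keyword_count[keyword] = keyword_count.get(keyword, 0) + 1
--
--     # Mark entries containing duplicate keywords
--     for entry in entries:
--         keywords = [k.strip().lower() for k in entry.get('keys', [])]
--         for keyword in keywords: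
--             if keyword and keyword_count[keyword] > 1:
--                 duplicate_entries.add(', '.join(entry.get('keys', [])))
--                 break
--
--     return duplicate_entries
-- ===== SOURCE B (Python) =====
-- def find_duplicate_keys(entries):
--     """Find entries that contain duplicate keywords."""
--     result = set()
--     for i, entry in enumerate(entries):
--         raw = entry.get('keys', [])
--         ks = [k.strip().lower() for k in raw]
--         ks = [k for k in ks if k]
--         others = entries[:i] + entries[i + 1:]
--         other = [k.strip().lower() for e in others for k in e.get('keys', [])]
--         if any(ks.count(k) > 1 or k in other for k in ks):
--             result.add(', '.join(raw))
--     return result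
-- ===== Notes on version B (the rewrite author's own statement) =====
-- stated objective: alternative
-- what changed: Removes A's global keyword-count dict and its two global passes entirely: B decides each entry locally in one enumerate loop, flagging it if it has a within-entry repeated normalized keyword or shares one with the concatenation entries[:i]+entries[i+1:] of all other entries (a pairwise membership test, at the price of a quadratic scan).
import Mathlib
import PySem

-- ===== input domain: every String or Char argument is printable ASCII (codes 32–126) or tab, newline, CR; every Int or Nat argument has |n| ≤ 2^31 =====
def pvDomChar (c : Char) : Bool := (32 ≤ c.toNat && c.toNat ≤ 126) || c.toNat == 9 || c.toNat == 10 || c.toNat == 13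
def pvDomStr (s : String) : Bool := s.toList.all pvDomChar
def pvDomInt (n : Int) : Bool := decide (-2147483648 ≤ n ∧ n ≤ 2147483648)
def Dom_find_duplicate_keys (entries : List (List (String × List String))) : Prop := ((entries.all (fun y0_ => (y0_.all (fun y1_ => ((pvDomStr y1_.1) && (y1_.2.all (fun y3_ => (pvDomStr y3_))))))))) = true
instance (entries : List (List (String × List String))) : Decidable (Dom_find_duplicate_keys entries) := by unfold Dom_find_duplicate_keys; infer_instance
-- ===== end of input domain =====

-- B drops A's global keyword-count dict entirely: each entry is judged on its own against the
-- OTHER entries (a within-entry repeat, or a normalized keyword shared with entries[:i]+entries[i+1:]);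
-- objective: alternative (per-entry pairwise decision instead of two global passes; not faster).
-- Shared helpers (the same Python expressions occur verbatim in both A and B):
-- k.strip().lower()
def pvNorm (k : String) : String := PySem.Str.lower (PySem.Str.strip k)
-- entry.get('keys', [])
def pvKeys (entry : List (String × List String)) : List String :=
  PySem.Dict.getD (PySem.Dict.mk entry) "keys" []
-- ', '.join(entry.get('keys', []))
def pvRepr (entry : List (String × List String)) : String := PySem.Str.join ", " (pvKeys entry)

-- ===== PORT A =====
-- if keyword: keyword_count[keyword] = keyword_count.get(keyword, 0) + 1
def pvCountStep (d : PySem.Dict String Int) (kw : String) : PySem.Dict String Int :=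
  if kw ≠ "" then PySem.Dict.modify d kw 0 (· + 1) else d
-- second pass inner loop with break; 'keyword_count[keyword]' is ported as getD _ _ 0, exact here
-- because it is only read for a nonempty normalized keyword, which pass 1 necessarily counted.
def pvMarkA (d : PySem.Dict String Int) (r : String) (kws : List String) (s : PySem.Set String) :
    PySem.Set String :=
  match kws with
  | [] => s
  | kw :: rest =>
      if kw ≠ "" ∧ 1 < PySem.Dict.getD d kw 0 then PySem.Set.add s r else pvMarkA d r rest s

def find_duplicate_keys (entries : List (List (String × List String))) : List String :=
  let keyword_count : PySem.Dict String Int :=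
    entries.foldl (fun d entry => ((pvKeys entry).map pvNorm).foldl pvCountStep d) PySem.Dict.empty
  entries.foldl
    (fun s entry => pvMarkA keyword_count (pvRepr entry) ((pvKeys entry).map pvNorm) s)
    PySem.Set.empty

-- ===== PORT B =====
-- for i, entry in enumerate(entries): judge entry against entries[:i] + entries[i+1:]
def find_duplicate_keys_alt (entries : List (List (String × List String))) : List String :=
  (PySem.List.enumerate entries).foldl
    (fun result ie =>
      let raw := pvKeys ie.2
      -- ks = [k for k in [k.strip().lower() for k in raw] if k]
      let ks := (raw.map pvNorm).filter (fun k => k ≠ "")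
      -- others = entries[:i] + entries[i+1:]
      let others := PySem.List.slice entries none (some ie.1)
                      ++ PySem.List.slice entries (some (ie.1 + 1)) none
      -- other = [k.strip().lower() for e in others for k in e.get('keys', [])]
      let other := others.flatMap (fun e => (pvKeys e).map pvNorm)
      -- any(ks.count(k) > 1 or k in other for k in ks)
      if ks.any (fun k => decide (1 < PySem.List.count ks k) || other.contains k)
      then PySem.Set.add result (PySem.Str.join ", " raw)
      else result)
    PySem.Set.empty

-- ===== PRECONDITION & SPEC =====
def Spec_find_duplicate_keys (entries : List (List (String × List String))) (out : List String) : Prop := out = find_duplicate_keys_alt entries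
instance (entries : List (List (String × List String))) (out : List String) : Decidable (Spec_find_duplicate_keys entries out) := by unfold Spec_find_duplicate_keys; infer_instance

-- ===== CLAIM (what is proved, stated in full; the proofs are below) =====
def Claim_equal_find_duplicate_keys : Prop := ∀ (entries : List (List (String × List String))), Dom_find_duplicate_keys entries → Spec_find_duplicate_keys entries (find_duplicate_keys entries)

-- ===== LEMMAS AND PROOFS =====

-- the flat list of normalized keywords, in scan order
def pvFlat (entries : List (List (String × List String))) : List String :=
  entries.flatMap (fun entry => (pvKeys entry).map pvNorm)

-- the filtered (nonempty) normalized keywords of one entry — B's 'ks'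
def pvKs (entry : List (String × List String)) : List String :=
  ((pvKeys entry).map pvNorm).filter (fun k => k ≠ "")

-- A's counting double loop is the flat fold
theorem pvCount_flat (entries : List (List (String × List String))) (d : PySem.Dict String Int) :
    entries.foldl (fun d entry => ((pvKeys entry).map pvNorm).foldl pvCountStep d) d
      = (pvFlat entries).foldl pvCountStep d := by
  induction entries generalizing d with
  | nil => rfl
  | cons e es ih =>
      simp only [List.foldl_cons, pvFlat, List.flatMap_cons, List.foldl_append]
      exact ih _

-- A's dict counts the nonempty normalized keywords
theorem pvCount_getD (l : List String) (d : PySem.Dict String Int) (x : String) :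
    PySem.Dict.getD (l.foldl pvCountStep d) x 0
      = PySem.Dict.getD d x 0 + ((l.filter (fun kw => kw ≠ "")).count x : Int) := by
  have h : l.foldl pvCountStep d
      = (l.filter (fun kw => kw ≠ "")).foldl (fun d x => PySem.Dict.modify d x 0 (· + 1)) d := by
    rw [List.foldl_filter]
    congr 1
    funext a b
    simp [pvCountStep]
  rw [h, PySem.Dict.getD_foldl_modify_add_one]

-- A's break loop returns 'add' iff some keyword fires
theorem pvMarkA_eq (d : PySem.Dict String Int) (r : String) (l : List String)
    (s : PySem.Set String) :
    pvMarkA d r l s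
      = if ∃ kw ∈ l, kw ≠ "" ∧ 1 < PySem.Dict.getD d kw 0 then PySem.Set.add s r else s := by
  induction l with
  | nil => simp [pvMarkA]
  | cons kw rest ih =>
      simp only [pvMarkA]
      by_cases h : kw ≠ "" ∧ 1 < PySem.Dict.getD d kw 0
      · simp [h]
      · simp only [if_neg h, ih]
        congr 1
        simp only [List.mem_cons, eq_iff_iff]
        constructor
        · rintro ⟨k, hk, hp⟩; exact ⟨k, Or.inr hk, hp⟩
        · rintro ⟨k, hk | hk, hp⟩
          · subst hk; exact absurd hp h
          · exact ⟨k, hk, hp⟩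

-- splitting the global filtered count at position i
theorem pvCount_split (entries : List (List (String × List String))) (i : Nat)
    (hi : i < entries.length) (kw : String) :
    ((pvFlat entries).filter (fun k => k ≠ "")).count kw
      = (pvKs entries[i]).count kw
        + (((List.take i entries ++ List.drop (i + 1) entries).flatMap
              (fun e => (pvKeys e).map pvNorm)).filter (fun k => k ≠ "")).count kw := by
  conv_lhs => rw [← List.take_append_drop i entries, List.drop_eq_getElem_cons hi]
  simp only [pvFlat, pvKs, List.flatMap_append, List.flatMap_cons, List.filter_append,
    List.count_append]
  omega

-- A's per-entry condition equals B's per-entry condition, at each index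
theorem pvCond_iff (entries : List (List (String × List String))) (i : Nat)
    (hi : i < entries.length) :
    (∃ kw ∈ (pvKeys entries[i]).map pvNorm, kw ≠ "" ∧
        1 < PySem.Dict.getD ((pvFlat entries).foldl pvCountStep PySem.Dict.empty) kw 0)
      ↔ ((pvKs entries[i]).any (fun k => decide (1 < PySem.List.count (pvKs entries[i]) k)
            || ((List.take i entries ++ List.drop (i + 1) entries).flatMap
                  (fun e => (pvKeys e).map pvNorm)).contains k) = true) := by
  simp only [List.any_eq_true, Bool.or_eq_true, decide_eq_true_eq, List.contains_iff_mem,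
    PySem.List.count_eq]
  constructor
  · rintro ⟨kw, hmem, hne, hcnt⟩
    have hks : kw ∈ pvKs entries[i] := by
      simp only [pvKs, List.mem_filter, decide_eq_true_eq]; exact ⟨hmem, hne⟩
    refine ⟨kw, hks, ?_⟩
    rw [pvCount_getD, PySem.Dict.getD_empty, pvCount_split entries i hi] at hcnt
    rcases Nat.lt_or_ge 1 ((pvKs entries[i]).count kw) with h1 | h1
    · exact Or.inl h1
    · right
      have hpos : 0 < (((List.take i entries ++ List.drop (i + 1) entries).flatMap
          (fun e => (pvKeys e).map pvNorm)).filter (fun k => k ≠ "")).count kw := by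
        have := List.count_pos_iff.mpr hks
        omega
      have := List.count_pos_iff.mp hpos
      exact (List.mem_filter.mp this).1
  · rintro ⟨kw, hks, hcase⟩
    obtain ⟨hmem, hne⟩ : kw ∈ (pvKeys entries[i]).map pvNorm ∧ kw ≠ "" := by
      have := List.mem_filter.mp hks
      simpa using this
    refine ⟨kw, hmem, hne, ?_⟩
    rw [pvCount_getD, PySem.Dict.getD_empty, pvCount_split entries i hi]
    rcases hcase with h | h
    · omega
    · have hfo : kw ∈ ((List.take i entries ++ List.drop (i + 1) entries).flatMap
          (fun e => (pvKeys e).map pvNorm)).filter (fun k => k ≠ "") := by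
        exact List.mem_filter.mpr ⟨h, by simpa using hne⟩
      have h2 := List.count_pos_iff.mpr hfo
      have h1 := List.count_pos_iff.mpr hks
      omega

-- ===== VERDICT (by name: the statement is the Claim_ definition above) =====
theorem find_duplicate_keys_spec : Claim_equal_find_duplicate_keys := by
  intro entries _
  unfold Spec_find_duplicate_keys find_duplicate_keys find_duplicate_keys_alt
  rw [pvCount_flat]
  have hmap : ∀ (d : PySem.Dict String Int),
      entries.foldl (fun s entry => pvMarkA d (pvRepr entry) ((pvKeys entry).map pvNorm) s)
          PySem.Set.empty
        = (PySem.List.enumerate entries).foldl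
            (fun s p => pvMarkA d (pvRepr p.2) ((pvKeys p.2).map pvNorm) s) PySem.Set.empty := by
    intro d
    conv_lhs => rw [← PySem.List.map_snd_enumerate entries 0]
    rw [List.foldl_map]
  rw [hmap]
  apply PySem.List.foldl_congr_mem
  intro acc p hp
  obtain ⟨k, hk, rfl⟩ := (PySem.List.mem_enumerate_iff entries 0 p).mp hp
  simp only [zero_add]
  rw [pvMarkA_eq]
  have hsl1 : PySem.List.slice entries none (some (k : Int)) = List.take k entries :=
    PySem.List.slice_to entries (by positivity)
  have htn : ((k : Int) + 1).toNat = k + 1 := by omega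
  have hsl2 : PySem.List.slice entries (some ((k : Int) + 1)) none = List.drop (k + 1) entries := by
    rw [PySem.List.slice_from entries (by positivity), htn]
  simp only [hsl1, hsl2]
  have hiff := pvCond_iff entries k hk
  simp only [pvKs] at hiff
  split_ifs with h1 h2
  · rfl
  · exact absurd (hiff.mp h1) h2
  · exact absurd (hiff.mpr ‹_›) h1
  · rfl
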